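-- pv_equiv track=rewrite | github.com/timurbakibayev/certify | certify/cert/quiz_flow.py | textbox
-- ===== SOURCE A (Python) =====
-- def textbox(x,line_number):
--     minus = 0
--     in_minus = False
--     out = ''
--     answers = []
--     number = 0
--     for s in x:
--         if not in_minus:
--             out += s
--         if s == '-':
--             minus += 1
--         else:
--             minus = 0
--         if minus == 3:
--             minus = 0
--             if not in_minus:
--                 out = out[:-3]
--                 number += 1
--                 out += "</span><input name='d" + str(line_number*100+number) + "' class='width-dynamic django-latexify inputstyle'><span class='django-latexify text'>"
--             in_minus = not in_minus
--     return out
-- ===== SOURCE B (Python) =====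
-- def textbox(x, line_number):
--     # split-then-reassemble instead of a per-character state machine
--     segs = x.split('---')
--     out = segs[0]
--     number = 0
--     rest = segs[1:]
--     while rest:
--         number += 1
--         out += ("</span><input name='d" + str(line_number * 100 + number)
--                 + "' class='width-dynamic django-latexify inputstyle'><span class='django-latexify text'>")
--         rest = rest[1:]          # discard the inside-the-box segment
--         if rest:
--             out += rest[0]       # keep the following outside segment
--             rest = rest[1:]
--     return out
-- ===== Notes on version B (the rewrite author's own statement) =====
-- stated objective: alternative
-- what changed: Replaces A's per-character dash-counting state machine (with its out[:-3] backtracking) by a single x.split('---') followed by a pairwise reassembly of the segment list: keep segment 0, then for each (inside, outside) pair emit the input-box string, drop the inside segment and append the outside one.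
import Mathlib
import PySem

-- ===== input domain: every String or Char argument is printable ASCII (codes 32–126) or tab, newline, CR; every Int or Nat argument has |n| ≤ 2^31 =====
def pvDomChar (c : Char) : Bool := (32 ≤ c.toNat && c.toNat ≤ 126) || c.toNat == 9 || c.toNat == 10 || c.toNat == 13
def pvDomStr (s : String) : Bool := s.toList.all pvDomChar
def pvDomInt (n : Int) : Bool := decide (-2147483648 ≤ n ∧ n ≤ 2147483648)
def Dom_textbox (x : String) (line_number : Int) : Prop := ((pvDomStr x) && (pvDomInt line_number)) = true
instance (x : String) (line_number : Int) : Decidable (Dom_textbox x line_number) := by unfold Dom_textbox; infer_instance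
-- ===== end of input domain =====

-- B replaces A's per-character dash-counting state machine by split('---') followed by a
-- pairwise reassembly of the segments (objective: simpler; same return value, no side effects).

-- the input-box string both Python sources build by the same literal concatenation
def pvBoxChars (line_number number : Int) : List Char :=
  "</span><input name='d".toList ++ (PySem.Int.toStr (line_number * 100 + number)).toList
    ++ "' class='width-dynamic django-latexify inputstyle'><span class='django-latexify text'>".toList

-- ===== PORT A =====
-- state = (minus, in_minus, out, number); the Python local `answers` is never used and is omitted
def stepA (line_number : Int) (st : Int × Bool × List Char × Int) (s : Char) :
    Int × Bool × List Char × Int :=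
  let minus := st.1
  let in_minus := st.2.1
  let out := st.2.2.1
  let number := st.2.2.2
  let out := if ¬ in_minus then out ++ [s] else out
  let minus := if s = '-' then minus + 1 else (0 : Int)
  if minus = 3 then
    if ¬ in_minus then
      let out := PySem.List.slice out none (some (-3))      -- out[:-3]
      let number := number + 1
      let out := out ++ pvBoxChars line_number number
      (0, true, out, number)
    else (0, false, out, number)
  else (minus, in_minus, out, number)

def textbox (x : String) (line_number : Int) : String :=
  String.ofList ((x.toList.foldl (stepA line_number) (0, false, [], 0)).2.2.1)

-- ===== PORT B =====
-- the while loop of Source B: rest of the segments, consumed in (inside, outside) pairs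
def pairGoB (line_number : Int) (number : Int) : List (List Char) → List Char
  | [] => []
  | _ :: [] => pvBoxChars line_number (number + 1)
  | _ :: r :: rr => pvBoxChars line_number (number + 1) ++ r ++ pairGoB line_number (number + 1) rr

def textbox_alt (x : String) (line_number : Int) : String :=
  let segs := PySem.Chars.splitOn x.toList ('-' :: '-' :: '-' :: [])
  String.ofList (segs.headD [] ++ pairGoB line_number 0 (segs.drop 1))

-- ===== PRECONDITION & SPEC =====
def Spec_textbox (x : String) (line_number : Int) (out : String) : Prop := out = textbox_alt x line_number
instance (x : String) (line_number : Int) (out : String) : Decidable (Spec_textbox x line_number out) := by unfold Spec_textbox; infer_instance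

-- ===== CLAIM (what is proved, stated in full; the proofs are below) =====
def Claim_equal_textbox : Prop := ∀ (x : String) (line_number : Int), Dom_textbox x line_number → Spec_textbox x line_number (textbox x line_number)

-- ===== LEMMAS AND PROOFS =====

def pvDashes : List Char := ['-', '-', '-']

-- clean recursive characterisation of splitOn on the '---' separator
def spl : List Char → List (List Char)
  | [] => [[]]
  | c :: rest =>
    if pvDashes.isPrefixOf (c :: rest) then [] :: spl (rest.drop 2)
    else (c :: (spl rest).headD []) :: (spl rest).tail
termination_by l => l.length
decreasing_by
  · simp only [List.length_cons, List.length_drop]; omega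
  · simp only [List.length_cons]; omega

theorem spl_ne_nil (l : List Char) : spl l ≠ [] := by
  cases l with
  | nil => simp [spl]
  | cons c rest => rw [spl]; split <;> simp

theorem headD_cons_tail {α : Type} (l : List (List α)) (h : l ≠ []) :
    l.head?.getD [] :: l.tail = l := by
  cases l with
  | nil => exact absurd rfl h
  | cons a t => rfl

theorem go_spec : ∀ (fuel : ℕ) (l cur : List Char) (acc : List (List Char)), l.length < fuel →
    PySem.Chars.splitOn.go pvDashes fuel l cur acc
      = acc.reverse ++ (cur.reverse ++ (spl l).headD []) :: (spl l).tail := by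
  intro fuel
  induction fuel with
  | zero => intro l cur acc h; omega
  | succ f ih =>
    intro l cur acc h
    cases l with
    | nil => simp [PySem.Chars.splitOn.go, spl]
    | cons c rest =>
      rw [PySem.Chars.splitOn.go]
      by_cases hp : pvDashes.isPrefixOf (c :: rest)
      · rw [if_pos hp]
        have hlen : ((c :: rest).drop pvDashes.length).length < f := by
          simp only [pvDashes, List.length_cons, List.length_drop] at *
          omega
        rw [ih _ _ _ hlen]
        have hd : (c :: rest).drop pvDashes.length = rest.drop 2 := by
          simp [pvDashes]
        rw [hd]
        rw [spl, if_pos hp]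
        simp [headD_cons_tail _ (spl_ne_nil (rest.drop 2))]
      · rw [if_neg hp]
        have hlen : rest.length < f := by simp at h; omega
        rw [ih _ _ _ hlen]
        rw [spl, if_neg hp]
        simp

theorem splitOn_eq_spl (l : List Char) : PySem.Chars.splitOn l pvDashes = spl l := by
  rw [PySem.Chars.splitOn, go_spec (l.length + 1) l [] [] (by omega)]
  simp only [List.headD_eq_head?_getD, List.reverse_nil, List.nil_append]
  rw [headD_cons_tail _ (spl_ne_nil l)]

-- reassembly: what A's machine produces on the segment list, starting outside/inside a box
def asm (ln : Int) : Bool → Int → List (List Char) → List Char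
  | _, _, [] => []
  | false, n, s :: rest =>
    s ++ (match rest with
          | [] => ([] : List Char)
          | _ :: _ => pvBoxChars ln (n + 1) ++ asm ln true (n + 1) rest)
  | true, n, _ :: rest => asm ln false n rest

theorem slice_drop3 (o : List Char) :
    PySem.List.slice (o ++ ['-', '-', '-']) none (some (-3)) = o := by
  rw [PySem.List.slice_to_neg_ofNat _ 3 (by omega)]
  simp

theorem spl_cons_of_ne (c : Char) (rest : List Char)
    (hp : pvDashes.isPrefixOf (c :: rest) = false) :
    spl (c :: rest) = (c :: (spl rest).head?.getD []) :: (spl rest).tail := by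
  rw [spl, if_neg (by simp [hp])]
  simp

theorem foldA_spec (ln : Int) : ∀ (k : ℕ) (l : List Char), l.length ≤ k →
    ∀ (b : Bool) (out : List Char) (n : Int),
    (l.foldl (stepA ln) (0, b, out, n)).2.2.1 = out ++ asm ln b n (spl l) := by
  intro k
  induction k with
  | zero =>
    intro l h b out n
    have hl : l = [] := List.eq_nil_of_length_eq_zero (by omega)
    subst hl
    cases b <;> simp [spl, asm]
  | succ f ih =>
    intro l h b out n
    cases l with
    | nil => cases b <;> simp [spl, asm]
    | cons c rest =>
      by_cases hc : c = '-'
      case neg =>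
        -- one non-dash character: peel one cons on both sides
        have hp : pvDashes.isPrefixOf (c :: rest) = false := by
          simp [pvDashes, List.isPrefixOf, beq_eq_false_iff_ne.mpr (Ne.symm hc)]
        rw [spl_cons_of_ne c rest hp]
        obtain ⟨hR, tR, hsr⟩ : ∃ hh tt, spl rest = hh :: tt := by
          cases hs : spl rest with
          | nil => exact absurd hs (spl_ne_nil rest)
          | cons a t => exact ⟨a, t, rfl⟩
        rw [hsr]
        have hlen : rest.length ≤ f := by simp at h; omega
        cases b with
        | false =>
          rw [List.foldl_cons, show stepA ln (0, false, out, n) c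
              = (0, false, out ++ [c], n) by simp [stepA, hc]]
          rw [ih rest hlen false (out ++ [c]) n, hsr]
          cases tR <;> simp [asm]
        | true =>
          rw [List.foldl_cons, show stepA ln (0, true, out, n) c
              = (0, true, out, n) by simp [stepA, hc]]
          rw [ih rest hlen true out n, hsr]
          simp [asm]
      case pos =>
        subst hc
        cases rest with
        | nil =>
          cases b <;> simp [stepA, spl, asm, pvDashes]
        | cons c2 rest2 =>
          by_cases hc2 : c2 = '-'
          case neg =>
            -- dash then non-dash: peel two conses
            have hp1 : pvDashes.isPrefixOf ('-' :: c2 :: rest2) = false := by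
              simp [pvDashes, List.isPrefixOf, beq_eq_false_iff_ne.mpr (Ne.symm hc2)]
            have hp2 : pvDashes.isPrefixOf (c2 :: rest2) = false := by
              simp [pvDashes, List.isPrefixOf, beq_eq_false_iff_ne.mpr (Ne.symm hc2)]
            rw [spl_cons_of_ne _ _ hp1, spl_cons_of_ne _ _ hp2]
            obtain ⟨hR, tR, hsr⟩ : ∃ hh tt, spl rest2 = hh :: tt := by
              cases hs : spl rest2 with
              | nil => exact absurd hs (spl_ne_nil rest2)
              | cons a t => exact ⟨a, t, rfl⟩
            rw [hsr]
            have hlen : rest2.length ≤ f := by simp at h; omega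
            cases b with
            | false =>
              rw [List.foldl_cons, show stepA ln (0, false, out, n) '-'
                  = (1, false, out ++ ['-'], n) by simp [stepA]]
              rw [List.foldl_cons, show stepA ln (1, false, out ++ ['-'], n) c2
                  = (0, false, out ++ ['-'] ++ [c2], n) by simp [stepA, hc2]]
              rw [ih rest2 hlen false (out ++ ['-'] ++ [c2]) n, hsr]
              cases tR <;> simp [asm]
            | true =>
              rw [List.foldl_cons, show stepA ln (0, true, out, n) '-'
                  = (1, true, out, n) by simp [stepA]]
              rw [List.foldl_cons, show stepA ln (1, true, out, n) c2
                  = (0, true, out, n) by simp [stepA, hc2]]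
              rw [ih rest2 hlen true out n, hsr]
              simp [asm]
          case pos =>
            subst hc2
            cases rest2 with
            | nil =>
              cases b <;> simp [stepA, spl, asm, pvDashes]
            | cons c3 rest3 =>
              by_cases hc3 : c3 = '-'
              case neg =>
                -- two dashes then a non-dash: peel three conses
                have hp1 : pvDashes.isPrefixOf ('-' :: '-' :: c3 :: rest3) = false := by
                  simp [pvDashes, List.isPrefixOf, beq_eq_false_iff_ne.mpr (Ne.symm hc3)]
                have hp2 : pvDashes.isPrefixOf ('-' :: c3 :: rest3) = false := by
                  simp [pvDashes, List.isPrefixOf, beq_eq_false_iff_ne.mpr (Ne.symm hc3)]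
                have hp3 : pvDashes.isPrefixOf (c3 :: rest3) = false := by
                  simp [pvDashes, List.isPrefixOf, beq_eq_false_iff_ne.mpr (Ne.symm hc3)]
                rw [spl_cons_of_ne _ _ hp1, spl_cons_of_ne _ _ hp2, spl_cons_of_ne _ _ hp3]
                obtain ⟨hR, tR, hsr⟩ : ∃ hh tt, spl rest3 = hh :: tt := by
                  cases hs : spl rest3 with
                  | nil => exact absurd hs (spl_ne_nil rest3)
                  | cons a t => exact ⟨a, t, rfl⟩
                rw [hsr]
                have hlen : rest3.length ≤ f := by simp at h; omega
                cases b with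
                | false =>
                  rw [List.foldl_cons, show stepA ln (0, false, out, n) '-'
                      = (1, false, out ++ ['-'], n) by simp [stepA]]
                  rw [List.foldl_cons, show stepA ln (1, false, out ++ ['-'], n) '-'
                      = (2, false, out ++ ['-'] ++ ['-'], n) by simp [stepA]]
                  rw [List.foldl_cons, show stepA ln (2, false, out ++ ['-'] ++ ['-'], n) c3
                      = (0, false, out ++ ['-'] ++ ['-'] ++ [c3], n) by simp [stepA, hc3]]
                  rw [ih rest3 hlen false (out ++ ['-'] ++ ['-'] ++ [c3]) n, hsr]
                  cases tR <;> simp [asm]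
                | true =>
                  rw [List.foldl_cons, show stepA ln (0, true, out, n) '-'
                      = (1, true, out, n) by simp [stepA]]
                  rw [List.foldl_cons, show stepA ln (1, true, out, n) '-'
                      = (2, true, out, n) by simp [stepA]]
                  rw [List.foldl_cons, show stepA ln (2, true, out, n) c3
                      = (0, true, out, n) by simp [stepA, hc3]]
                  rw [ih rest3 hlen true out n, hsr]
                  simp [asm]
              case pos =>
                subst hc3
                -- '---' found: the machine fires and toggles in_minus
                have hsp : spl ('-' :: '-' :: '-' :: rest3) = [] :: spl rest3 := by
                  rw [spl, if_pos (by simp [pvDashes])]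
                  simp
                rw [hsp]
                obtain ⟨hR, tR, hsr⟩ : ∃ hh tt, spl rest3 = hh :: tt := by
                  cases hs : spl rest3 with
                  | nil => exact absurd hs (spl_ne_nil rest3)
                  | cons a t => exact ⟨a, t, rfl⟩
                rw [hsr]
                have hlen : rest3.length ≤ f := by simp at h; omega
                cases b with
                | false =>
                  rw [List.foldl_cons, show stepA ln (0, false, out, n) '-'
                      = (1, false, out ++ ['-'], n) by simp [stepA]]
                  rw [List.foldl_cons, show stepA ln (1, false, out ++ ['-'], n) '-'
                      = (2, false, out ++ ['-'] ++ ['-'], n) by simp [stepA]]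
                  have hfire : stepA ln (2, false, out ++ ['-'] ++ ['-'], n) '-'
                      = (0, true, out ++ pvBoxChars ln (n + 1), n + 1) := by
                    simp only [stepA]
                    norm_num
                    rw [slice_drop3]
                  rw [List.foldl_cons, hfire]
                  rw [ih rest3 hlen true (out ++ pvBoxChars ln (n + 1)) (n + 1), hsr]
                  simp [asm]
                | true =>
                  rw [List.foldl_cons, show stepA ln (0, true, out, n) '-'
                      = (1, true, out, n) by simp [stepA]]
                  rw [List.foldl_cons, show stepA ln (1, true, out, n) '-'
                      = (2, true, out, n) by simp [stepA]]
                  rw [List.foldl_cons, show stepA ln (2, true, out, n) '-'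
                      = (0, false, out, n) by simp [stepA]]
                  rw [ih rest3 hlen false out n, hsr]
                  simp [asm]

theorem pairGoB_eq (ln : Int) : ∀ (k : ℕ) (rest : List (List Char)), rest.length ≤ k → ∀ n,
    pairGoB ln n rest
      = (match rest with
         | [] => ([] : List Char)
         | _ :: _ => pvBoxChars ln (n + 1) ++ asm ln true (n + 1) rest) := by
  intro k
  induction k with
  | zero =>
    intro rest h n
    cases rest with
    | nil => rfl
    | cons => simp at h
  | succ f ih =>
    intro rest h n
    match rest with
    | [] => rfl
    | [i] => simp [pairGoB, asm]
    | i :: r :: rr =>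
      rw [pairGoB]
      rw [ih rr (by simp at h; omega) (n + 1)]
      cases rr with
      | nil => simp [asm]
      | cons a b => simp [asm]

-- ===== VERDICT (by name: the statement is the Claim_ definition above) =====
theorem textbox_spec : Claim_equal_textbox := by
  intro x ln _
  unfold Spec_textbox textbox textbox_alt
  rw [foldA_spec ln x.toList.length x.toList le_rfl false [] 0]
  rw [show ('-' :: '-' :: '-' :: [] : List Char) = pvDashes from rfl, splitOn_eq_spl]
  obtain ⟨s, t, hst⟩ : ∃ s t, spl x.toList = s :: t := by
    cases h : spl x.toList with
    | nil => exact absurd h (spl_ne_nil _)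
    | cons a b => exact ⟨a, b, rfl⟩
  rw [hst]
  simp only [List.headD_cons, List.drop_one, List.tail_cons, List.nil_append]
  rw [pairGoB_eq ln t.length t le_rfl 0]
  cases t with
  | nil => simp [asm]
  | cons a b => simp [asm]
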